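-- pv_equiv track=rewrite | github.com/MrBrantCode/unitest_baseline | mut_generate/mist_train_cf/cf_43123/solution.py | process_arguments
-- ===== SOURCE A (Python) =====
-- def process_arguments(args):
--     accession_number = ''
--     reference_number = ''
--     i = 0
--     while i < len(args):
--         if args[i] == '-number' and i + 1 < len(args):
--             accession_number = args[i + 1]
--         elif args[i] == '-reference' and i + 1 < len(args):
--             reference_number = args[i + 1]
--         i += 1
--     return (accession_number, reference_number)
-- ===== SOURCE B (Python) =====
-- def process_arguments(args):
--     def last_value(flag):
--         # scan backwards; the first hit from the end is the last occurrence
--         for i in range(len(args) - 2, -1, -1):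
--             if args[i] == flag:
--                 return args[i + 1]
--         return ''
--     return (last_value('-number'), last_value('-reference'))
-- ===== Notes on version B (the rewrite author's own statement) =====
-- stated objective: alternative
-- what changed: Replaces A's single forward pass with two overwrite accumulators by two independent backward scans, each returning at the first hit from the end (which is the last occurrence forward), with no accumulators at all.
import Mathlib
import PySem

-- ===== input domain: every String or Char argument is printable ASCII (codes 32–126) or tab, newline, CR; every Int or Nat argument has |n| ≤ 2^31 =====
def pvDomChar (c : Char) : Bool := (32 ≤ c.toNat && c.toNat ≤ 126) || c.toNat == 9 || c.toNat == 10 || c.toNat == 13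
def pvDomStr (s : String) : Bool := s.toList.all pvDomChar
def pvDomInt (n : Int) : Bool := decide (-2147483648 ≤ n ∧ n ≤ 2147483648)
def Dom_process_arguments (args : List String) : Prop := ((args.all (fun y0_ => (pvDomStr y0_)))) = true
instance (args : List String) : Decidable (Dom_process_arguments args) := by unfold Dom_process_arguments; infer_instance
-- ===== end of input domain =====

-- B replaces A's forward accumulator pass by two backward early-exit searches (alternative decomposition; same cost).


-- ===== PORT A =====
-- the while loop: index i, two string accumulators; args[i] is in range whenever read
def pvLoopA (args : List String) (i : Nat) (acc ref : String) : String × String :=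
  if i < args.length then
    if args.getD i "" = "-number" ∧ i + 1 < args.length then
      pvLoopA args (i + 1) (args.getD (i + 1) "") ref
    else if args.getD i "" = "-reference" ∧ i + 1 < args.length then
      pvLoopA args (i + 1) acc (args.getD (i + 1) "")
    else
      pvLoopA args (i + 1) acc ref
  else (acc, ref)
termination_by args.length - i

def process_arguments (args : List String) : String × String :=
  pvLoopA args 0 "" ""

-- ===== PORT B =====
-- last_value's backward loop: pvSearch args flag n scans indices n-1, n-2, …, 0,
-- returning args[j+1] at the first j with args[j] = flag, else ""
def pvSearch (args : List String) (flag : String) : Nat → String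
  | 0 => ""
  | n + 1 => if args.getD n "" = flag then args.getD (n + 1) "" else pvSearch args flag n

def process_arguments_alt (args : List String) : String × String :=
  (pvSearch args "-number" (args.length - 1), pvSearch args "-reference" (args.length - 1))

-- ===== PRECONDITION & SPEC =====
def Spec_process_arguments (args : List String) (out : String × String) : Prop := out = process_arguments_alt args
instance (args : List String) (out : String × String) : Decidable (Spec_process_arguments args out) := by unfold Spec_process_arguments; infer_instance

-- ===== CLAIM (what is proved, stated in full; the proofs are below) =====
def Claim_equal_process_arguments : Prop := ∀ (args : List String), Dom_process_arguments args → Spec_process_arguments args (process_arguments args)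

-- ===== LEMMAS AND PROOFS =====

-- the last value args[j+1] with args[j] = key, j >= i, j+1 < len (none if no such j)
def pvLastFrom (args : List String) (key : String) (i : Nat) : Option String :=
  if i < args.length then
    match pvLastFrom args key (i + 1) with
    | some v => some v
    | none =>
      if args.getD i "" = key ∧ i + 1 < args.length then some (args.getD (i + 1) "") else none
  else none
termination_by args.length - i

theorem pvLastFrom_none (args : List String) (key : String) (i : Nat)
    (h : args.length ≤ i + 1) : pvLastFrom args key i = none := by
  unfold pvLastFrom
  split
  · rename_i hi
    rw [pvLastFrom_none args key (i + 1) (by omega)]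
    simp only
    rw [if_neg (by omega)]
  · rfl
termination_by args.length - i

theorem pvLastFrom_getD_step (args : List String) (key : String) (i : Nat) (dflt : String)
    (h : i < args.length) :
    (pvLastFrom args key i).getD dflt =
      (pvLastFrom args key (i + 1)).getD
        (if args.getD i "" = key ∧ i + 1 < args.length then args.getD (i + 1) "" else dflt) := by
  conv_lhs => rw [pvLastFrom]
  rw [if_pos h]
  cases hn : pvLastFrom args key (i + 1) with
  | some v => simp
  | none =>
    simp only [Option.getD_none]
    split <;> rfl

theorem pvLoopA_eq_lastFrom (args : List String) (k : Nat) :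
    ∀ i, args.length - i ≤ k → ∀ acc ref,
      pvLoopA args i acc ref =
        ((pvLastFrom args "-number" i).getD acc, (pvLastFrom args "-reference" i).getD ref) := by
  induction k with
  | zero =>
    intro i hi acc ref
    unfold pvLoopA
    rw [if_neg (by omega)]
    rw [pvLastFrom_none args _ i (by omega), pvLastFrom_none args _ i (by omega)]
    rfl
  | succ k ih =>
    intro i hi acc ref
    by_cases hlt : i < args.length
    · unfold pvLoopA
      rw [if_pos hlt]
      have hrec : args.length - (i + 1) ≤ k := by omega
      rw [pvLastFrom_getD_step args "-number" i acc hlt,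
          pvLastFrom_getD_step args "-reference" i ref hlt]
      by_cases h1 : args.getD i "" = "-number" ∧ i + 1 < args.length
      · have h2 : ¬ (args.getD i "" = "-reference" ∧ i + 1 < args.length) := by
          intro hc; rw [h1.1] at hc; exact absurd hc.1 (by decide)
        rw [if_pos h1, if_pos h1, if_neg h2, ih (i + 1) hrec]
      · rw [if_neg h1, if_neg h1]
        by_cases h2 : args.getD i "" = "-reference" ∧ i + 1 < args.length
        · rw [if_pos h2, if_pos h2, ih (i + 1) hrec]
        · rw [if_neg h2, if_neg h2, ih (i + 1) hrec]
    · unfold pvLoopA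
      rw [if_neg hlt]
      rw [pvLastFrom_none args _ i (by omega), pvLastFrom_none args _ i (by omega)]
      rfl

-- first match scanning down from n-1 = last match scanning up through range n
theorem pvSearch_eq_rangeFold (args : List String) (key : String) :
    ∀ n, pvSearch args key n =
      (List.range n).foldl
        (fun acc j => if args.getD j "" = key then args.getD (j + 1) "" else acc) "" := by
  intro n
  induction n with
  | zero => rfl
  | succ n ih =>
    rw [List.range_succ, List.foldl_append, List.foldl_cons, List.foldl_nil, ← ih]
    show (if args.getD n "" = key then args.getD (n + 1) "" else pvSearch args key n) = _
    rfl

-- the "last match" fold over range' i k (k = len-1-i) equals pvLastFrom with default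
theorem pvRangeFold_eq_lastFrom (args : List String) (key : String) :
    ∀ (k i : Nat), args.length - 1 - i = k → ∀ dflt,
      (List.range' i k).foldl
        (fun acc j => if args.getD j "" = key then args.getD (j + 1) "" else acc) dflt =
      (pvLastFrom args key i).getD dflt := by
  intro k
  induction k with
  | zero =>
    intro i hk dflt
    rw [pvLastFrom_none args key i (by omega)]
    rfl
  | succ k ih =>
    intro i hk dflt
    have h1 : i + 1 < args.length := by omega
    rw [List.range'_succ, List.foldl_cons, ih (i + 1) (by omega),
        pvLastFrom_getD_step args key i dflt (by omega)]
    by_cases he : args.getD i "" = key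
    · rw [if_pos he, if_pos ⟨he, h1⟩]
    · rw [if_neg he, if_neg (fun h => he h.1)]

-- ===== VERDICT (by name: the statement is the Claim_ definition above) =====
theorem process_arguments_spec : Claim_equal_process_arguments := by
  intro args _
  unfold Spec_process_arguments process_arguments process_arguments_alt
  rw [pvLoopA_eq_lastFrom args args.length 0 (by omega)]
  rw [pvSearch_eq_rangeFold, pvSearch_eq_rangeFold]
  simp only [List.range_eq_range']
  rw [pvRangeFold_eq_lastFrom args "-number" (args.length - 1) 0 (by omega),
      pvRangeFold_eq_lastFrom args "-reference" (args.length - 1) 0 (by omega)]
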